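-- pv_equiv track=rewrite | github.com/GnanaMahesh/AI-ML-projects | lab-12/Questions/rushikesh.py | make_allpermut
-- ===== SOURCE A (Python) =====
-- import itertools
--
-- def make_allpermut(num_players_info, num_strategies_per_player):
--     """
--     Args:
--     num_players_info (int): The number of players.
--     num_strategies_per_player (list): A list containing the number of strategies each player has.
--     Returns:
--     list: A list of all possible permutations of strategies.
--     """
--     somelists=[]
--     temp=[[]  for i in range(num_players_info)]
--     for k in range(num_players_info):
--         temp[k]=[i for i in range(num_strategies_per_player[k])]
--         somelists.append(temp[k])
--
--     allpermut=list(itertools.product(*somelists))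
--     for i in range(len(allpermut)):
--         allpermut[i]=list(allpermut[i])
--     return allpermut
-- ===== SOURCE B (Python) =====
-- def make_allpermut(num_players_info, num_strategies_per_player):
--     """
--     Rank-decoding: compute the i-th strategy profile directly from its index i
--     by mixed-radix (divmod) decomposition, instead of enumerating nested loops.
--     """
--     sizes = [max(num_strategies_per_player[k], 0) for k in range(num_players_info)]
--     total = 1
--     for n in sizes:
--         total *= n
--     out = []
--     for i in range(total):
--         digits = []
--         r = i
--         for n in reversed(sizes):
--             digits.append(r % n)
--             r //= n
--         digits.reverse()
--         out.append(digits)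
--     return out
-- ===== Notes on version B (the rewrite author's own statement) =====
-- stated objective: alternative
-- what changed: Instead of enumerating the Cartesian product by nested iteration (itertools.product), B computes the total count as the product of the strategy counts and reconstructs the i-th profile directly from its rank i by mixed-radix divmod decoding.
import Mathlib
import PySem

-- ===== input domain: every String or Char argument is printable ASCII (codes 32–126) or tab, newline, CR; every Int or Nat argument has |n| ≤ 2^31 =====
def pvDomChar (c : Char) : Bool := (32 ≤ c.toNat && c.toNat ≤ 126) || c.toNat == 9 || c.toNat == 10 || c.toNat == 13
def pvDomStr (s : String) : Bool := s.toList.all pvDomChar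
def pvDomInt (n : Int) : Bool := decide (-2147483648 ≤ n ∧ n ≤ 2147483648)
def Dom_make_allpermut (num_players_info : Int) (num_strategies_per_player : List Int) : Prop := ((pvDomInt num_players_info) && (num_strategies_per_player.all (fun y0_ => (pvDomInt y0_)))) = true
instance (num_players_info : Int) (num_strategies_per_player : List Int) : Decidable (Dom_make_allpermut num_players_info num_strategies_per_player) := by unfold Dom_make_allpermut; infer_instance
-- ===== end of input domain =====

-- B replaces A's nested-iteration Cartesian product (itertools.product over range pools)
-- by rank decoding: the i-th profile is computed from its index i by mixed-radix divmod
-- decomposition (objective: alternative).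

-- ===== PORT A =====
-- itertools.product(*somelists), each tuple rendered directly as a List Int
def pvProd : List (List Int) → List (List Int)
  | [] => [[]]
  | p :: ps => p.flatMap (fun s => (pvProd ps).map (fun t => s :: t))

-- one iteration of A's somelists-building loop (none = IndexError)
def pvStepA (sp : List Int) (o : Option (List (List Int))) (k : Int) : Option (List (List Int)) :=
  o.bind (fun ls => (PySem.List.pyGet? sp k).map (fun v => ls ++ [PySem.List.pyRange 0 v 1]))

def make_allpermut (num_players_info : Int) (num_strategies_per_player : List Int) : List (List Int) :=
  match (PySem.List.pyRange 0 num_players_info 1).foldl (pvStepA num_strategies_per_player) (some []) with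
  | none => []   -- Python raises IndexError here; excluded by Pre_
  | some somelists => (pvProd somelists).map (fun x => x)  -- the list(tuple) conversion loop: identity on List Int

-- ===== PORT B =====
-- one iteration of B's sizes-building comprehension (none = IndexError); max v 0 = len(range(v))
def pvStepB (sp : List Int) (o : Option (List Int)) (k : Int) : Option (List Int) :=
  o.bind (fun acc => (PySem.List.pyGet? sp k).map (fun v => acc ++ [max v 0]))

-- one step of the divmod digit loop: digits.append(r % n); r //= n
def pvDig (p : List Int × Int) (n : Int) : List Int × Int :=
  (p.1 ++ [PySem.Int.mod p.2 n], PySem.Int.floordiv p.2 n)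

-- the digit loop 'for n in reversed(sizes)' starting from r
def pvG (ss : List Int) (r : Int) : List Int × Int := ss.reverse.foldl pvDig ([], r)

def make_allpermut_alt (num_players_info : Int) (num_strategies_per_player : List Int) : List (List Int) :=
  match (PySem.List.pyRange 0 num_players_info 1).foldl (pvStepB num_strategies_per_player) (some []) with
  | none => []   -- Python raises IndexError here; excluded by Pre_
  | some sizes =>
    let total := sizes.foldl (· * ·) 1
    (PySem.List.pyRange 0 total 1).map (fun i => (pvG sizes i).1.reverse)

-- ===== PRECONDITION & SPEC =====
-- Pre_ excludes exactly the inputs where both Pythons raise IndexError: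
-- more players than entries in num_strategies_per_player.
def Pre_make_allpermut (num_players_info : Int) (num_strategies_per_player : List Int) : Prop :=
  num_players_info ≤ (num_strategies_per_player.length : Int)
instance (num_players_info : Int) (num_strategies_per_player : List Int) : Decidable (Pre_make_allpermut num_players_info num_strategies_per_player) := by unfold Pre_make_allpermut; infer_instance

def pvWitness_make_allpermut : Int × List Int := (2, [2, 3])

def Spec_make_allpermut (num_players_info : Int) (num_strategies_per_player : List Int) (out : List (List Int)) : Prop := out = make_allpermut_alt num_players_info num_strategies_per_player
instance (num_players_info : Int) (num_strategies_per_player : List Int) (out : List (List Int)) : Decidable (Spec_make_allpermut num_players_info num_strategies_per_player out) := by unfold Spec_make_allpermut; infer_instance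

-- ===== CLAIM (what is proved, stated in full; the proofs are below) =====
def Claim_equal_make_allpermut : Prop := ∀ (num_players_info : Int) (num_strategies_per_player : List Int), Dom_make_allpermut num_players_info num_strategies_per_player → Pre_make_allpermut num_players_info num_strategies_per_player → Spec_make_allpermut num_players_info num_strategies_per_player (make_allpermut num_players_info num_strategies_per_player)

-- ===== LEMMAS AND PROOFS =====

theorem pvG_cons (s : Int) (ss : List Int) (r : Int) :
    pvG (s :: ss) r = pvDig (pvG ss r) s := by
  simp [pvG, List.foldl_append]

-- digit extraction: decoding a*T + i (0 ≤ i < T = prod ss) gives the digits of i, leftover a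
theorem pvG_spec (ss : List Int) (hpos : ∀ x ∈ ss, 1 ≤ x) (a i : Int)
    (h0 : 0 ≤ i) (hi : i < ss.prod) :
    pvG ss (a * ss.prod + i) = ((pvG ss i).1, a) := by
  induction ss generalizing a i with
  | nil =>
      simp only [List.prod_nil] at hi
      have : i = 0 := by omega
      subst this
      simp [pvG]
  | cons s ss ih =>
      have hs : 1 ≤ s := hpos s (by simp)
      have hss : ∀ x ∈ ss, 1 ≤ x := fun x hx => hpos x (by simp [hx])
      have hT : 0 < ss.prod := List.prod_pos (fun x hx => by have := hss x hx; omega)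
      set T := ss.prod with hTdef
      simp only [List.prod_cons] at hi
      rw [← hTdef] at hi
      -- write i = b*T + i0
      set b := i / T with hb
      set i0 := i % T with hi0
      have hi0b : 0 ≤ i0 := Int.emod_nonneg i (by omega)
      have hi0lt : i0 < T := Int.emod_lt_of_pos i hT
      have hieq : i = b * T + i0 := by
        rw [hb, hi0]; rw [mul_comm]; exact (Int.ediv_add_emod i T).symm
      have hb0 : 0 ≤ b := Int.ediv_nonneg h0 (by omega)
      have hbs : b < s := by
        by_contra hc
        push Not at hc
        have : s * T ≤ b * T := by
          apply mul_le_mul_of_nonneg_right hc (by omega)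
        omega
      have key : a * (s * T) + i = (a * s + b) * T + i0 := by rw [hieq]; ring
      simp only [List.prod_cons, ← hTdef]
      rw [key, pvG_cons, ih hss (a * s + b) i0 hi0b hi0lt]
      have hiG : pvG ss i = ((pvG ss i0).1, b) := by
        rw [hieq]; exact ih hss b i0 hi0b hi0lt
      rw [pvG_cons, hiG]
      simp only [pvDig]
      have hmod : PySem.Int.mod (a * s + b) s = b := by
        rw [PySem.Int.mod_eq_emod_of_pos (by omega)]
        have : a * s + b = b + s * a := by ring
        rw [this, Int.add_mul_emod_self_left]
        exact Int.emod_eq_of_lt hb0 hbs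
      have hdiv : PySem.Int.floordiv (a * s + b) s = a := by
        rw [PySem.Int.floordiv_eq_ediv_of_pos (by omega)]
        have : a * s + b = b + s * a := by ring
        rw [this, Int.add_mul_ediv_left _ _ (by omega : s ≠ 0)]
        rw [Int.ediv_eq_zero_of_lt hb0 hbs]
        ring
      have hmod0 : PySem.Int.mod b s = b := by
        rw [PySem.Int.mod_eq_emod_of_pos (by omega)]
        exact Int.emod_eq_of_lt hb0 hbs
      rw [hmod, hdiv, hmod0]

-- shift a unit range
theorem pyRange_shift (a b : Int) :
    PySem.List.pyRange a b 1 = (PySem.List.pyRange 0 (b - a) 1).map (fun k => a + k) := by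
  rw [PySem.List.pyRange_one, PySem.List.pyRange_one]
  simp [List.map_map, Function.comp_def]

-- split range(0, s*T) into s blocks of length T  (s, T ≥ 0)
theorem pyRange_mul_split (s T : Int) (hs : 0 ≤ s) (hT : 0 ≤ T) :
    PySem.List.pyRange 0 (s * T) 1
      = (PySem.List.pyRange 0 s 1).flatMap
          (fun x => (PySem.List.pyRange 0 T 1).map (fun i => x * T + i)) := by
  obtain ⟨n, rfl⟩ := Int.eq_ofNat_of_zero_le hs
  clear hs
  induction n with
  | zero => simp [PySem.List.pyRange_one_eq_nil]
  | succ n ih =>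
      have h1 : ((n + 1 : Nat) : Int) * T = (n : Int) * T + T := by push_cast; ring
      have h2 : (0 : Int) ≤ (n : Int) * T := by positivity
      rw [h1, PySem.List.pyRange_one_append 0 ((n : Int) * T) ((n : Int) * T + T) h2 (by omega),
          ih]
      have h3 : PySem.List.pyRange 0 ((n + 1 : Nat) : Int) 1
          = PySem.List.pyRange 0 (n : Int) 1 ++ [(n : Int)] := by
        have : ((n + 1 : Nat) : Int) = (n : Int) + 1 := by push_cast; ring
        rw [this, PySem.List.pyRange_one_succ_right (by positivity)]
      rw [h3, List.flatMap_append]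
      congr 1
      have h4 : PySem.List.pyRange ((n : Int) * T) ((n : Int) * T + T) 1
          = (PySem.List.pyRange 0 T 1).map (fun k => (n : Int) * T + k) := by
        rw [pyRange_shift ((n : Int) * T) ((n : Int) * T + T)]
        norm_num
      simp [h4]

-- main lemma: product of ranges = rank decoding of range(prod)
theorem pvProd_eq_decode (ss : List Int) (hnn : ∀ x ∈ ss, 0 ≤ x) :
    pvProd (ss.map (fun s => PySem.List.pyRange 0 s 1))
      = (PySem.List.pyRange 0 ss.prod 1).map (fun i => (pvG ss i).1.reverse) := by
  induction ss with
  | nil =>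
      simp [pvProd, PySem.List.pyRange_one_cons (by norm_num : (0:Int) < 1),
            PySem.List.pyRange_one_eq_nil (by norm_num : (1:Int) ≤ 1), pvG]
  | cons s ss ih =>
      have hs : 0 ≤ s := hnn s (by simp)
      have hss : ∀ x ∈ ss, 0 ≤ x := fun x hx => hnn x (by simp [hx])
      have hT : 0 ≤ ss.prod := List.prod_nonneg hss
      simp only [List.map_cons, pvProd, List.prod_cons, ih hss]
      by_cases hzero : s * ss.prod = 0
      · rw [hzero, PySem.List.pyRange_one_eq_nil (le_refl 0)]
        rcases mul_eq_zero.1 hzero with h | h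
        · rw [h, PySem.List.pyRange_one_eq_nil (le_refl 0)]
          simp
        · rw [h, PySem.List.pyRange_one_eq_nil (le_refl 0)]
          simp
      · have hspos : 0 < s := lt_of_le_of_ne hs (fun h => hzero (by rw [← h]; ring))
        have hTpos : 0 < ss.prod :=
          lt_of_le_of_ne hT (fun h => hzero (by rw [← h]; ring))
        have hpos : ∀ x ∈ ss, 1 ≤ x := by
          intro x hx
          have h0 := hss x hx
          by_contra hc
          have hx0 : x = 0 := by omega
          exact hzero (by rw [List.prod_eq_zero (hx0 ▸ hx)]; ring)
        rw [pyRange_mul_split s ss.prod hs hT, List.map_flatMap]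
        unfold List.flatMap
        congr 1
        apply List.map_congr_left
        intro x hxmem
        rw [PySem.List.mem_pyRange_one] at hxmem
        rw [List.map_map, List.map_map]
        apply List.map_congr_left
        intro i himem
        rw [PySem.List.mem_pyRange_one] at himem
        simp only [Function.comp_def]
        have hdec : pvG (s :: ss) (x * ss.prod + i) = ((pvG ss i).1 ++ [x], PySem.Int.floordiv x s) := by
          rw [pvG_cons, show pvG ss (x * ss.prod + i) = ((pvG ss i).1, x) from pvG_spec ss hpos x i himem.1 himem.2, pvDig]
          have hmod : PySem.Int.mod x s = x := by
            rw [PySem.Int.mod_eq_emod_of_pos hspos]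
            exact Int.emod_eq_of_lt hxmem.1 hxmem.2
          rw [hmod]
        rw [hdec]
        simp

-- B's range-building fold tracks A's: B's state is the lengths of A's pools
theorem loops_linked (sp : List Int) (idxs : List Int) (ls0 : List (List Int)) :
    idxs.foldl (pvStepB sp) (some (ls0.map (fun l => (l.length : Int))))
      = (idxs.foldl (pvStepA sp) (some ls0)).map (List.map (fun l => (l.length : Int))) := by
  induction idxs generalizing ls0 with
  | nil => simp
  | cons k rest ih =>
      simp only [List.foldl_cons, pvStepA, pvStepB, Option.bind_some]
      cases h : PySem.List.pyGet? sp k with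
      | none =>
          simp only [Option.map_none]
          have hnB : ∀ l : List Int, l.foldl (pvStepB sp) none = none := by
            intro l; induction l with
            | nil => rfl
            | cons a t iht => simp [pvStepB, iht]
          have hnA : ∀ l : List Int, l.foldl (pvStepA sp) none = none := by
            intro l; induction l with
            | nil => rfl
            | cons a t iht => simp [pvStepA, iht]
          simp [hnB, hnA]
      | some v =>
          simp only [Option.map_some]
          have hlen : ((PySem.List.pyRange 0 v 1).length : Int) = max v 0 := by
            rw [PySem.List.length_pyRange_one]
            omega
          have : ls0.map (fun l => (l.length : Int)) ++ [max v 0]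
              = (ls0 ++ [PySem.List.pyRange 0 v 1]).map (fun l => (l.length : Int)) := by
            simp only [List.map_append, List.map_cons, List.map_nil, hlen]
          rw [this, ih]

-- every pool A builds is a unit range, so it is the range of its own length
theorem loopA_ranges (sp : List Int) (idxs : List Int) (ls0 ls' : List (List Int))
    (h0 : ∀ l ∈ ls0, ∃ v : Int, l = PySem.List.pyRange 0 v 1)
    (h : idxs.foldl (pvStepA sp) (some ls0) = some ls') :
    ∀ l ∈ ls', ∃ v : Int, l = PySem.List.pyRange 0 v 1 := by
  induction idxs generalizing ls0 with
  | nil => simp at h; subst h; exact h0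
  | cons k rest ih =>
      simp only [List.foldl_cons, pvStepA, Option.bind_some] at h
      cases hg : PySem.List.pyGet? sp k with
      | none =>
          rw [hg] at h
          simp only [Option.map_none] at h
          have hnA : ∀ l : List Int, l.foldl (pvStepA sp) none = none := by
            intro l; induction l with
            | nil => rfl
            | cons a t iht => simp [pvStepA, iht]
          rw [hnA] at h
          exact absurd h (by simp)
      | some v =>
          rw [hg] at h
          simp only [Option.map_some] at h
          refine ih (ls0 ++ [PySem.List.pyRange 0 v 1]) ?_ h
          intro l hl
          rcases List.mem_append.1 hl with hl | hl
          · exact h0 l hl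
          · simp at hl; exact ⟨v, hl⟩

theorem range_of_length (v : Int) :
    PySem.List.pyRange 0 (((PySem.List.pyRange 0 v 1).length : Nat) : Int) 1
      = PySem.List.pyRange 0 v 1 := by
  rw [PySem.List.length_pyRange_one, PySem.List.pyRange_one, PySem.List.pyRange_one]
  have h : ((((v - 0).toNat : Nat) : Int) - 0).toNat = (v - 0).toNat := by omega
  rw [h]

-- ===== VERDICT (by name: the statement is the Claim_ definition above) =====
theorem make_allpermut_spec : Claim_equal_make_allpermut := by
  intro n sp _ _
  unfold Spec_make_allpermut make_allpermut make_allpermut_alt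
  have hlink := loops_linked sp (PySem.List.pyRange 0 n 1) []
  simp only [List.map_nil] at hlink
  cases hA : (PySem.List.pyRange 0 n 1).foldl (pvStepA sp) (some []) with
  | none => rw [hA] at hlink; simp only [Option.map_none] at hlink; rw [hlink]
  | some ls =>
      rw [hA] at hlink
      simp only [Option.map_some] at hlink
      rw [hlink]
      simp only [List.map_id_fun', id]
      have hranges := loopA_ranges sp (PySem.List.pyRange 0 n 1) [] ls (by simp) hA
      set ss := ls.map (fun l => (l.length : Int)) with hss
      have hmap : ss.map (fun s => PySem.List.pyRange 0 s 1) = ls := by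
        rw [hss, List.map_map]
        trans (ls.map id)
        · apply List.map_congr_left
          intro l hl
          obtain ⟨v, rfl⟩ := hranges l hl
          exact range_of_length v
        · exact List.map_id ls
      have hnn : ∀ x ∈ ss, 0 ≤ x := by
        intro x hx
        rw [hss] at hx
        simp only [List.mem_map] at hx
        obtain ⟨l, _, rfl⟩ := hx
        positivity
      have hdec := pvProd_eq_decode ss hnn
      rw [hmap] at hdec
      rw [hdec, ← List.prod_eq_foldl]
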